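-- pv_equiv track=rewrite | github.com/gunwokimm/ppp2025 | hw10/morerainfall.py | get_rain_events
-- ===== SOURCE A (Python) =====
-- def get_rain_events(rainfalls):
--     events = []
--     c_days = 0
--     for rain in rainfalls:
--         if rain > 0:
--             c_days += 1
--         else:
--             if c_days >0:
--                 events.append(c_days)
--             c_days = 0
--     if c_days > 0:
--         events.append(c_days)
--
--
--     return events
-- ===== SOURCE B (Python) =====
-- def get_rain_events(rainfalls):
--     events = []
--     i, n = 0, len(rainfalls)
--     while i < n:
--         if rainfalls[i] > 0:
--             j = i
--             while j < n and rainfalls[j] > 0: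
--                 j += 1
--             events.append(j - i)
--             i = j
--         else:
--             i += 1
--     return events
-- ===== Notes on version B (the rewrite author's own statement) =====
-- stated objective: alternative
-- what changed: Replaces the single-pass accumulator-with-trailing-flush by an index-jumping run scanner: an outer loop skips non-positive days and, at each run start, an inner scan finds the run's end and appends its length directly, so no pending counter or flush branch exists.
import Mathlib
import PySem

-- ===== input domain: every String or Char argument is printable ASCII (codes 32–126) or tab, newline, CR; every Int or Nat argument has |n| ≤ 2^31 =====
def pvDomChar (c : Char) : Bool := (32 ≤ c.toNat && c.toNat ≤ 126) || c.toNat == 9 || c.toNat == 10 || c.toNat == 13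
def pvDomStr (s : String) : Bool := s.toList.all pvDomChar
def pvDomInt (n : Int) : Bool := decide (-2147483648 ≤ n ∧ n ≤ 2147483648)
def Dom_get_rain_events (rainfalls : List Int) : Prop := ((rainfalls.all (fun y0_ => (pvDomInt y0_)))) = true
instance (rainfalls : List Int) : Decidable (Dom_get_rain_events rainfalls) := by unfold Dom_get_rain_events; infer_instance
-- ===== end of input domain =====

-- B replaces A's running counter + trailing flush by an index-jumping run scanner (alternative decomposition, same cost).


-- ===== PORT A =====
def get_rain_events (rainfalls : List Int) : List Int :=
  let st := rainfalls.foldl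
    (fun (p : List Int × Int) rain =>
      if rain > 0 then (p.1, p.2 + 1)
      else (if p.2 > 0 then p.1 ++ [p.2] else p.1, 0))
    ([], 0)
  if st.2 > 0 then st.1 ++ [st.2] else st.1

-- ===== PORT B =====
-- inner while loop of B: length of the leading positive run and the list remaining after it
def pvSpanPos : List Int → Nat × List Int
  | [] => (0, [])
  | x :: xs => if x > 0 then let p := pvSpanPos xs; (p.1 + 1, p.2) else (0, x :: xs)

theorem pvSpanPos_len_le : ∀ l : List Int, (pvSpanPos l).2.length ≤ l.length := by
  intro l
  induction l with
  | nil => simp [pvSpanPos]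
  | cons x xs ih =>
    simp only [pvSpanPos]
    split
    · exact le_trans ih (Nat.le_succ _)
    · simp

-- outer loop of B: skip a non-positive day, or emit the leading run's length and jump past it
def get_rain_events_alt (rainfalls : List Int) : List Int :=
  match rainfalls with
  | [] => []
  | x :: xs =>
    if x > 0 then
      let p := pvSpanPos (x :: xs)
      ((p.1 : Int)) :: get_rain_events_alt p.2
    else
      get_rain_events_alt xs
termination_by rainfalls.length
decreasing_by
  · simpa [pvSpanPos, ‹x > 0›, Nat.lt_succ_iff] using pvSpanPos_len_le xs
  · simp

-- ===== PRECONDITION & SPEC =====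
def Spec_get_rain_events (rainfalls : List Int) (out : List Int) : Prop := out = get_rain_events_alt rainfalls
instance (rainfalls : List Int) (out : List Int) : Decidable (Spec_get_rain_events rainfalls out) := by unfold Spec_get_rain_events; infer_instance

-- ===== CLAIM (what is proved, stated in full; the proofs are below) =====
def Claim_equal_get_rain_events : Prop := ∀ (rainfalls : List Int), Dom_get_rain_events rainfalls → Spec_get_rain_events rainfalls (get_rain_events rainfalls)

-- ===== LEMMAS AND PROOFS =====

-- reference function for the proof: A's behaviour with a pending counter c
def pvPend (c : Int) : List Int → List Int
  | [] => if c > 0 then [c] else []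
  | x :: xs => if x > 0 then pvPend (c + 1) xs else (if c > 0 then [c] else []) ++ pvPend 0 xs

theorem pvA_fold_eq_pend : ∀ (l : List Int) (ev : List Int) (c : Int),
    (let st := l.foldl
      (fun (p : List Int × Int) rain =>
        if rain > 0 then (p.1, p.2 + 1)
        else (if p.2 > 0 then p.1 ++ [p.2] else p.1, 0)) (ev, c)
     if st.2 > 0 then st.1 ++ [st.2] else st.1) = ev ++ pvPend c l := by
  intro l
  induction l with
  | nil =>
    intro ev c
    simp only [List.foldl_nil, pvPend]
    split <;> simp
  | cons x xs ih =>
    intro ev c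
    simp only [List.foldl_cons, pvPend]
    by_cases hx : x > 0
    · simp only [hx, if_pos]
      exact ih ev (c + 1)
    · simp only [hx, if_false]
      rw [ih]
      by_cases hc : c > 0 <;> simp [hc, List.append_assoc]

theorem pvPend_pos : ∀ (l : List Int) (c : Int), 1 ≤ c →
    pvPend c l = (c + ((pvSpanPos l).1 : Int)) :: pvPend 0 (pvSpanPos l).2 := by
  intro l
  induction l with
  | nil =>
    intro c hc
    simp [pvPend, pvSpanPos, show c > 0 by omega]
  | cons x xs ih =>
    intro c hc
    by_cases hx : x > 0
    · simp only [pvPend, hx, if_pos, pvSpanPos]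
      rw [ih (c + 1) (by omega)]
      push_cast
      ring_nf
    · simp [pvPend, pvSpanPos, hx, show c > 0 by omega]

theorem pvPend_zero_eq_alt : ∀ (n : ℕ) (l : List Int), l.length ≤ n →
    pvPend 0 l = get_rain_events_alt l := by
  intro n
  induction n with
  | zero =>
    intro l hl
    have : l = [] := List.eq_nil_of_length_eq_zero (Nat.le_zero.mp hl)
    subst this
    simp [pvPend, get_rain_events_alt]
  | succ n ih =>
    intro l hl
    match l with
    | [] => simp [pvPend, get_rain_events_alt]
    | x :: xs =>
      by_cases hx : x > 0
      · rw [pvPend, if_pos hx]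
        have h01 : (0 : Int) + 1 = 1 := by norm_num
        rw [h01, pvPend_pos xs 1 le_rfl, get_rain_events_alt, if_pos hx]
        have hlen : (pvSpanPos xs).2.length ≤ n :=
          le_trans (pvSpanPos_len_le xs) (Nat.succ_le_succ_iff.mp hl)
        rw [ih _ hlen]
        simp only [pvSpanPos, hx, if_pos]
        push_cast
        ring_nf
      · rw [pvPend, if_neg hx, get_rain_events_alt, if_neg hx]
        norm_num
        exact ih xs (Nat.succ_le_succ_iff.mp hl)

-- ===== VERDICT (by name: the statement is the Claim_ definition above) =====
theorem get_rain_events_spec : Claim_equal_get_rain_events := by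
  intro rainfalls _
  unfold Spec_get_rain_events get_rain_events
  rw [pvA_fold_eq_pend rainfalls [] 0, List.nil_append]
  exact pvPend_zero_eq_alt rainfalls.length rainfalls le_rfl
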